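-- pv_equiv track=rewrite | github.com/MrBrantCode/unitest_baseline | mut_generate/mist_train_cf/cf_21984/solution.py | char_indices
-- ===== SOURCE A (Python) =====
-- def char_indices(string):
--     char_dict = {}
--     for i, char in enumerate(string):
--         if char not in char_dict:
--             char_dict[char] = [i]
--         else:
--             char_dict[char].append(i)
--     return dict(sorted(char_dict.items(), key=lambda x: x[0], reverse=True))
-- ===== SOURCE B (Python) =====
-- def char_indices(string):
--     return {c: [i for i, ch in enumerate(string) if ch == c]
--             for c in sorted(set(string), reverse=True)}
-- ===== Notes on version B (the rewrite author's own statement) =====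
-- stated objective: simpler
-- what changed: B replaces A's grow-a-hashmap-of-lists loop followed by sorting the items by a dict comprehension: iterate the distinct characters in descending sorted order and collect each character's positions with a filter over enumerate(string).
import Mathlib
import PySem

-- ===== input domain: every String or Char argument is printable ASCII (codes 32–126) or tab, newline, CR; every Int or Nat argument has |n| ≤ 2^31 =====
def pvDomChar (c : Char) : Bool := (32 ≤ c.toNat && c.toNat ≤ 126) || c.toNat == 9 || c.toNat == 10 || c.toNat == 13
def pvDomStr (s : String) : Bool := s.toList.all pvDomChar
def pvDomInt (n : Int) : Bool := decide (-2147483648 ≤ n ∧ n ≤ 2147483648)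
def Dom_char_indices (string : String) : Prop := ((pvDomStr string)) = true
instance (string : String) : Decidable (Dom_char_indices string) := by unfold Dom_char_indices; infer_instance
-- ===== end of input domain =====

-- B replaces A's build-a-hashmap-then-sort-the-items pass by a dict comprehension over the
-- descending-sorted character set, collecting each character's positions by a filter over
-- enumerate(string) (objective: simpler; same result, proved equal for every string).

-- ===== PORT A =====
def char_indices (string : String) : List (String × List Int) :=
  -- for i, char in enumerate(string): … (each char of a Python str is a 1-char str)
  let d := (PySem.List.enumerate (string.toList.map (fun ch => String.mk [ch]))).foldl
    (fun d p =>
      if d.contains p.2 = false then d.insert p.2 [p.1]        -- char_dict[char] = [i]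
      else d.modify p.2 [] (fun xs => xs ++ [p.1]))            -- char_dict[char].append(i)
    PySem.Dict.empty
  -- dict(sorted(char_dict.items(), key=lambda x: x[0], reverse=True)); keys are unique,
  -- so the resulting dict's items are exactly the sorted items list
  PySem.List.sorted d.items (fun x => x.1) true

-- ===== PORT B =====
def char_indices_alt (string : String) : List (String × List Int) :=
  let chars := string.toList.map (fun ch => String.mk [ch])
  (PySem.List.sorted (PySem.Set.ofList chars) (fun c => c) true).map
    (fun c => (c, ((PySem.List.enumerate chars).filter (fun p => p.2 == c)).map (fun p => p.1)))

-- ===== PRECONDITION & SPEC =====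
def Spec_char_indices (string : String) (out : List (String × List Int)) : Prop := out = char_indices_alt string
instance (string : String) (out : List (String × List Int)) : Decidable (Spec_char_indices string out) := by unfold Spec_char_indices; infer_instance

-- ===== CLAIM (what is proved, stated in full; the proofs are below) =====
def Claim_equal_char_indices : Prop := ∀ (string : String), Dom_char_indices string → Spec_char_indices string (char_indices string)

-- ===== LEMMAS AND PROOFS =====

-- A's branched loop body is exactly Dict.modify (the else-branch literally, the then-branch
-- because modify on an absent key inserts f applied to the default).
theorem stepA_eq_modify :
    (fun (d : PySem.Dict String (List Int)) (p : Int × String) =>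
      if d.contains p.2 = false then d.insert p.2 [p.1]
      else d.modify p.2 [] (fun xs => xs ++ [p.1]))
    = fun d p => d.modify p.2 [] (fun xs => xs ++ [p.1]) := by
  funext d p
  by_cases h : d.contains p.2 = false
  · simp [h, PySem.Dict.modify, PySem.Dict.getD_of_not_contains d [] h]
  · simp [h]

-- the dict built by A's loop: its keys and its values
theorem dictA_keys (chars : List String) :
    ((PySem.List.enumerate chars).foldl
      (fun d p => d.modify p.2 [] (fun xs => xs ++ [p.1])) PySem.Dict.empty).keys
    = PySem.Set.ofList chars := by
  have h := PySem.Dict.keys_foldl_modify_key (PySem.List.enumerate chars)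
    (fun p => p.2) [] (fun _ p v => v ++ [p.1]) PySem.Dict.empty
  simpa [PySem.Set.update_nil_left, PySem.List.map_snd_enumerate] using h

theorem dictA_keys_nodup (chars : List String) :
    ((PySem.List.enumerate chars).foldl
      (fun d p => d.modify p.2 [] (fun xs => xs ++ [p.1])) PySem.Dict.empty).keys.Nodup := by
  exact PySem.Dict.nodup_keys_foldl_modify_key (PySem.List.enumerate chars)
    (fun p => p.2) [] (fun _ p v => v ++ [p.1]) PySem.Dict.empty (by simp [PySem.Dict.keys, PySem.Dict.empty])

theorem dictA_getD (chars : List String) (c : String) :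
    ((PySem.List.enumerate chars).foldl
      (fun d p => d.modify p.2 [] (fun xs => xs ++ [p.1])) PySem.Dict.empty).getD c []
    = ((PySem.List.enumerate chars).filter (fun p => p.2 == c)).map (fun p => p.1) := by
  have hfold :
      (PySem.List.enumerate chars).foldl
        (fun d p => d.modify p.2 [] (fun xs => xs ++ [p.1])) PySem.Dict.empty
      = ((PySem.List.enumerate chars).map (fun p => (p.2, p.1))).foldl
        (fun d p => d.modify p.1 [] (fun xs => xs ++ [p.2])) PySem.Dict.empty := by
    rw [List.foldl_map]
  rw [hfold, PySem.Dict.getD_foldl_modify_append]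
  simp only [List.filter_map, List.map_map]
  rfl

theorem char_indices_eq (string : String) :
    char_indices string = char_indices_alt string := by
  unfold char_indices char_indices_alt
  rw [stepA_eq_modify]
  set chars := string.toList.map (fun ch => String.mk [ch]) with hchars
  set d := (PySem.List.enumerate chars).foldl
    (fun d p => d.modify p.2 [] (fun xs => xs ++ [p.1])) PySem.Dict.empty with hd
  have hitems : d.items
      = (PySem.Set.ofList chars).map
          (fun c => (c, ((PySem.List.enumerate chars).filter (fun p => p.2 == c)).map (fun p => p.1))) := by
    rw [PySem.Dict.items_eq_map_keys d (dictA_keys_nodup chars) []]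
    rw [hd, dictA_keys chars]
    exact List.map_congr_left (fun c _ => by rw [← hd, dictA_getD chars c])
  -- the sorted items are exactly B's map over the descending-sorted key set
  have hnodup : (PySem.List.sorted (PySem.Set.ofList chars) (fun c => c) true).Nodup :=
    (PySem.List.sorted_perm (PySem.Set.ofList chars) (fun c => c) true).nodup_iff.mpr
      (PySem.Set.nodup_ofList chars)
  refine PySem.List.sorted_rev_eq_of_perm_of_pairwise_gt _ _ _ ?_ ?_
  · rw [hitems]
    exact ((PySem.List.sorted_perm (PySem.Set.ofList chars) (fun c => c) true).map _)
  · rw [List.pairwise_map]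
    have hle := PySem.List.sorted_pairwise_rev (PySem.Set.ofList chars) (fun c => c)
    exact (hle.and (List.nodup_iff_pairwise_ne.mp hnodup)).imp
      (fun h => lt_of_le_of_ne h.1 h.2.symm)

-- ===== VERDICT (by name: the statement is the Claim_ definition above) =====
theorem char_indices_spec : Claim_equal_char_indices := by
  intro string _
  unfold Spec_char_indices
  exact char_indices_eq string
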